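-- pv_equiv track=rewrite | github.com/buyablemos/TrackManiaBot | TrackManiaRealBot/src/map_interaction/map_graph.py | get_turns
-- ===== SOURCE A (Python) =====
-- def calculate_direction(block1, block2):
--     """
--     Calculate the direction between two blocks, it will be normalized
--     :param block1: the first block
--     :param block2: the second block
--     :return: the direction between the two blocks
--     """
--     direction = (block2[0] - block1[0], block2[1] - block1[1])
--     if direction[0] != 0:
--         direction = (direction[0] / abs(direction[0]), 0)
--     elif direction[1] != 0:
--         direction = (0, direction[1] / abs(direction[1]))
--     return direction
--
-- def get_turns(nodes):
--     """
--     Get the turns of the map.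
--     A left turn is represented by a -1 and a right turn by a 1
--     :param nodes: the list of the nodes
--     :return: a list of the turns
--     """
--     turns = []
--     for i in range(1, len(nodes) - 1):
--         if calculate_direction(nodes[i - 1], nodes[i]) == (-1, 0) and calculate_direction(nodes[i], nodes[i + 1]) == (0, 1):
--             turns.append(-1)
--         elif calculate_direction(nodes[i - 1], nodes[i]) == (0, 1) and calculate_direction(nodes[i], nodes[i + 1]) == (1, 0):
--             turns.append(-1)
--         elif calculate_direction(nodes[i - 1], nodes[i]) == (1, 0) and calculate_direction(nodes[i], nodes[i + 1]) == (0, -1):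
--             turns.append(-1)
--         elif calculate_direction(nodes[i - 1], nodes[i]) == (0, -1) and calculate_direction(nodes[i], nodes[i + 1]) == (-1, 0):
--             turns.append(-1)
--         else:
--             turns.append(1)
--
--     return turns
-- ===== SOURCE B (Python) =====
-- def calculate_direction(block1, block2):
--     direction = (block2[0] - block1[0], block2[1] - block1[1])
--     if direction[0] != 0:
--         direction = (direction[0] / abs(direction[0]), 0)
--     elif direction[1] != 0:
--         direction = (0, direction[1] / abs(direction[1]))
--     return direction
--
-- def get_turns(nodes):
--     dirs = [calculate_direction(a, b) for a, b in zip(nodes, nodes[1:])]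
--     return [-1 if d1[0] * d2[1] - d1[1] * d2[0] < 0 else 1
--             for d1, d2 in zip(dirs, dirs[1:])]
-- ===== Notes on version B (the rewrite author's own statement) =====
-- stated objective: simpler
-- what changed: A enumerates four explicit (prev-dir, next-dir) equality patterns per triple, recomputing calculate_direction up to eight times; B computes the direction of each consecutive pair once into a list and classifies each adjacent direction pair by the sign of a single cross product d1.x*d2.y - d1.y*d2.x.
import Mathlib
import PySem

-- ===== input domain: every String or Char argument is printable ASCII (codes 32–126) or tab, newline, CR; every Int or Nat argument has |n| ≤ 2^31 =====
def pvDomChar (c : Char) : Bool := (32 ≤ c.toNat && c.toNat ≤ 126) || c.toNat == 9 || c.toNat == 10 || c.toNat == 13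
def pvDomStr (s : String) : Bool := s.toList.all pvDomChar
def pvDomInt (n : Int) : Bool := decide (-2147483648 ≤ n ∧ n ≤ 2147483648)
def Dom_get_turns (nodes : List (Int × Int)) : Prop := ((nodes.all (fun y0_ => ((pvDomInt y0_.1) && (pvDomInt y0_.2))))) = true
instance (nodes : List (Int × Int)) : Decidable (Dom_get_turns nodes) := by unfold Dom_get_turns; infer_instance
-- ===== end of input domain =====

-- B replaces A's four-way equality enumeration over direction patterns by a single cross-product
-- sign test on directions computed once (objective: simpler; same asymptotic cost).

-- ===== PORT A =====
-- shared module helper; Python's float x/abs(x) is exactly ±1.0 here, equal to this Int quotient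
def calculate_direction (block1 block2 : Int × Int) : Int × Int :=
  let direction : Int × Int := (block2.1 - block1.1, block2.2 - block1.2)
  if direction.1 ≠ 0 then (direction.1 / |direction.1|, 0)
  else if direction.2 ≠ 0 then (0, direction.2 / |direction.2|)
  else direction

def get_turns (nodes : List (Int × Int)) : List Int :=
  (PySem.List.pyRange 1 (PySem.List.len nodes - 1) 1).foldl (fun turns i =>
    if calculate_direction (PySem.List.pyGetD nodes (i - 1) (0, 0)) (PySem.List.pyGetD nodes i (0, 0)) = (-1, 0) ∧
       calculate_direction (PySem.List.pyGetD nodes i (0, 0)) (PySem.List.pyGetD nodes (i + 1) (0, 0)) = (0, 1) then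
      turns ++ [-1]
    else if calculate_direction (PySem.List.pyGetD nodes (i - 1) (0, 0)) (PySem.List.pyGetD nodes i (0, 0)) = (0, 1) ∧
            calculate_direction (PySem.List.pyGetD nodes i (0, 0)) (PySem.List.pyGetD nodes (i + 1) (0, 0)) = (1, 0) then
      turns ++ [-1]
    else if calculate_direction (PySem.List.pyGetD nodes (i - 1) (0, 0)) (PySem.List.pyGetD nodes i (0, 0)) = (1, 0) ∧
            calculate_direction (PySem.List.pyGetD nodes i (0, 0)) (PySem.List.pyGetD nodes (i + 1) (0, 0)) = (0, -1) then
      turns ++ [-1]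
    else if calculate_direction (PySem.List.pyGetD nodes (i - 1) (0, 0)) (PySem.List.pyGetD nodes i (0, 0)) = (0, -1) ∧
            calculate_direction (PySem.List.pyGetD nodes i (0, 0)) (PySem.List.pyGetD nodes (i + 1) (0, 0)) = (-1, 0) then
      turns ++ [-1]
    else
      turns ++ [1]) []

-- ===== PORT B =====
def get_turns_alt (nodes : List (Int × Int)) : List Int :=
  let dirs := (nodes.zip nodes.tail).map (fun p => calculate_direction p.1 p.2)
  (dirs.zip dirs.tail).map (fun p => if p.1.1 * p.2.2 - p.1.2 * p.2.1 < 0 then (-1 : Int) else 1)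

-- ===== PRECONDITION & SPEC =====
def Spec_get_turns (nodes : List (Int × Int)) (out : List Int) : Prop := out = get_turns_alt nodes
instance (nodes : List (Int × Int)) (out : List Int) : Decidable (Spec_get_turns nodes out) := by unfold Spec_get_turns; infer_instance

-- ===== CLAIM (what is proved, stated in full; the proofs are below) =====
def Claim_equal_get_turns : Prop := ∀ (nodes : List (Int × Int)), Dom_get_turns nodes → Spec_get_turns nodes (get_turns nodes)

-- ===== LEMMAS AND PROOFS =====

-- calculate_direction only produces the five normalized directions
theorem calc_dir_cases (b1 b2 : Int × Int) :
    calculate_direction b1 b2 = (1, 0) ∨ calculate_direction b1 b2 = (-1, 0) ∨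
    calculate_direction b1 b2 = (0, 1) ∨ calculate_direction b1 b2 = (0, -1) ∨
    calculate_direction b1 b2 = (0, 0) := by
  rcases lt_trichotomy (b2.1 - b1.1) 0 with h | h | h
  · have hne : b2.1 - b1.1 ≠ 0 := ne_of_lt h
    right; left
    simp only [calculate_direction, ← Int.sign_eq_ediv_abs']
    simp [Int.sign_eq_neg_one_iff_neg.mpr h]
    exact fun h0 => absurd h0 hne
  · rcases lt_trichotomy (b2.2 - b1.2) 0 with h2 | h2 | h2
    · have hne : b2.2 - b1.2 ≠ 0 := ne_of_lt h2
      right; right; right; left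
      simp only [calculate_direction, h, ← Int.sign_eq_ediv_abs']
      simp [Int.sign_eq_neg_one_iff_neg.mpr h2]
      exact fun h0 => absurd h0 hne
    · right; right; right; right
      simp [calculate_direction, h, h2]
    · have hne : b2.2 - b1.2 ≠ 0 := ne_of_gt h2
      right; right; left
      simp only [calculate_direction, h, ← Int.sign_eq_ediv_abs']
      simp [Int.sign_eq_one_iff_pos.mpr h2]
      exact fun h0 => absurd h0 hne
  · have hne : b2.1 - b1.1 ≠ 0 := ne_of_gt h
    left
    simp only [calculate_direction, ← Int.sign_eq_ediv_abs']
    simp [Int.sign_eq_one_iff_pos.mpr h]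
    exact fun h0 => absurd h0 hne

-- the four-pattern branch equals the cross-product sign test, pointwise
theorem branch_eq_cross (a b c : Int × Int) :
    (if calculate_direction a b = (-1, 0) ∧ calculate_direction b c = (0, 1) then (-1 : Int)
     else if calculate_direction a b = (0, 1) ∧ calculate_direction b c = (1, 0) then -1
     else if calculate_direction a b = (1, 0) ∧ calculate_direction b c = (0, -1) then -1
     else if calculate_direction a b = (0, -1) ∧ calculate_direction b c = (-1, 0) then -1
     else 1) =
    (if (calculate_direction a b).1 * (calculate_direction b c).2 -
        (calculate_direction a b).2 * (calculate_direction b c).1 < 0 then (-1 : Int) else 1) := by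
  rcases calc_dir_cases a b with h1 | h1 | h1 | h1 | h1 <;>
    rcases calc_dir_cases b c with h2 | h2 | h2 | h2 | h2 <;>
      rw [h1, h2] <;> decide

-- pyRange with step 1 as a shifted List.range (specific shape used by port A)
theorem pyRange_shift (n : Nat) (a : Int) :
    PySem.List.pyRange a (a + n) 1 = (List.range n).map (fun k => a + (k : Int)) := by
  induction n with
  | zero => simp [PySem.List.pyRange_one_eq_nil]
  | succ m ih =>
    have : a + ((m : Int) + 1) = (a + m) + 1 := by ring
    rw [Nat.cast_succ, this, PySem.List.pyRange_one_succ_right (by omega), ih,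
      List.range_succ]
    simp

theorem get_turns_spec_aux (nodes : List (Int × Int)) :
    get_turns nodes = get_turns_alt nodes := by
  unfold get_turns get_turns_alt
  rw [show (fun (turns : List Int) i =>
    if calculate_direction (PySem.List.pyGetD nodes (i - 1) (0, 0)) (PySem.List.pyGetD nodes i (0, 0)) = (-1, 0) ∧
       calculate_direction (PySem.List.pyGetD nodes i (0, 0)) (PySem.List.pyGetD nodes (i + 1) (0, 0)) = (0, 1) then
      turns ++ [-1]
    else if calculate_direction (PySem.List.pyGetD nodes (i - 1) (0, 0)) (PySem.List.pyGetD nodes i (0, 0)) = (0, 1) ∧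
            calculate_direction (PySem.List.pyGetD nodes i (0, 0)) (PySem.List.pyGetD nodes (i + 1) (0, 0)) = (1, 0) then
      turns ++ [-1]
    else if calculate_direction (PySem.List.pyGetD nodes (i - 1) (0, 0)) (PySem.List.pyGetD nodes i (0, 0)) = (1, 0) ∧
            calculate_direction (PySem.List.pyGetD nodes i (0, 0)) (PySem.List.pyGetD nodes (i + 1) (0, 0)) = (0, -1) then
      turns ++ [-1]
    else if calculate_direction (PySem.List.pyGetD nodes (i - 1) (0, 0)) (PySem.List.pyGetD nodes i (0, 0)) = (0, -1) ∧
            calculate_direction (PySem.List.pyGetD nodes i (0, 0)) (PySem.List.pyGetD nodes (i + 1) (0, 0)) = (-1, 0) then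
      turns ++ [-1]
    else
      turns ++ [1]) = (fun turns i => turns ++ [
        if calculate_direction (PySem.List.pyGetD nodes (i - 1) (0, 0)) (PySem.List.pyGetD nodes i (0, 0)) = (-1, 0) ∧
           calculate_direction (PySem.List.pyGetD nodes i (0, 0)) (PySem.List.pyGetD nodes (i + 1) (0, 0)) = (0, 1) then (-1 : Int)
        else if calculate_direction (PySem.List.pyGetD nodes (i - 1) (0, 0)) (PySem.List.pyGetD nodes i (0, 0)) = (0, 1) ∧
                calculate_direction (PySem.List.pyGetD nodes i (0, 0)) (PySem.List.pyGetD nodes (i + 1) (0, 0)) = (1, 0) then -1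
        else if calculate_direction (PySem.List.pyGetD nodes (i - 1) (0, 0)) (PySem.List.pyGetD nodes i (0, 0)) = (1, 0) ∧
                calculate_direction (PySem.List.pyGetD nodes i (0, 0)) (PySem.List.pyGetD nodes (i + 1) (0, 0)) = (0, -1) then -1
        else if calculate_direction (PySem.List.pyGetD nodes (i - 1) (0, 0)) (PySem.List.pyGetD nodes i (0, 0)) = (0, -1) ∧
                calculate_direction (PySem.List.pyGetD nodes i (0, 0)) (PySem.List.pyGetD nodes (i + 1) (0, 0)) = (-1, 0) then -1
        else 1]) from by funext turns i; split_ifs <;> rfl]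
  rw [PySem.List.foldl_append_singleton_eq_map, PySem.List.len_eq]
  by_cases hn : nodes.length ≤ 2
  · rw [PySem.List.pyRange_one_eq_nil (by omega)]
    match nodes, hn with
    | [], _ => rfl
    | [_], _ => rfl
    | [_, _], _ => rfl
  · replace hn : 2 < nodes.length := by omega
    rw [show ((nodes.length : Int) - 1) = 1 + ((nodes.length - 2 : Nat) : Int) from by omega,
      pyRange_shift]
    apply List.ext_getElem
    · simp; omega
    · intro k hk1 hk2
      have hk : k < nodes.length - 2 := by
        simpa [List.pure_def, List.bind_eq_flatMap, ← List.map_eq_flatMap] using hk1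
      have hb2 : k + 2 < nodes.length := by omega
      have hb1 : k + 1 < nodes.length := by omega
      have hb0 : k < nodes.length := by omega
      simp only [List.nil_append, List.pure_def, List.bind_eq_flatMap, ← List.map_eq_flatMap, List.getElem_map, List.getElem_range,
        List.getElem_zip, List.getElem_tail]
      rw [show (1 + (k : Int)) - 1 = ((k : Nat) : Int) from by omega,
        show (1 + (k : Int)) + 1 = (((k + 2) : Nat) : Int) from by push_cast; ring,
        show (1 + (k : Int)) = (((k + 1) : Nat) : Int) from by push_cast; ring]
      simp only [PySem.List.pyGetD_natCast, List.getD_eq_getElem?_getD, List.getElem?_eq_getElem,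
        hb0, hb1, hb2, Option.getD_some]
      exact branch_eq_cross nodes[k] nodes[k + 1] nodes[k + 2]

-- ===== VERDICT (by name: the statement is the Claim_ definition above) =====
theorem get_turns_spec : Claim_equal_get_turns := by
  intro nodes _
  unfold Spec_get_turns
  exact get_turns_spec_aux nodes
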